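-- pv_equiv track=rewrite | github.com/emilienbld/eval_python | exercice_quatre.py | separer_phrase
-- ===== SOURCE A (Python) =====
-- def separer_phrase(phrase):
--     mots = []         # Liste pour stocker les mots de la phrase
--     separateurs = []  # Liste pour stocker les séparateurs (espaces, virgules, ...)
--     mot = ''          # Chaîne temporaire pour construire un mot au fur et à mesure
--
--     for char in phrase:
--         if char.isalnum() or char == "'":  # Si le caractère est une lettre, un chiffre ou une apostrophe
--             mot += char                    # Construit le mot en ajoutant le caractère
--         else:
--             if mot:                        # Si un mot a été construit, ajoute à la liste des mots
--                 mots.append(mot)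
--                 mot = ''                   # Réinitialise la variable pour le prochain mot
--             separateurs.append(char)       # Le caractère est un séparateur (espace, virgule, etc.)
--
--     if mot:                                # Si un mot est resté à la fin, on l'ajoute à la liste des mots
--         mots.append(mot)
--
--     return [mots, separateurs]  # Retourne deux listes : les mots et les séparateurs
-- ===== SOURCE B (Python) =====
-- def separer_phrase(phrase):
--     # Run-based scan: consume maximal runs of word characters in one jump
--     # instead of building a word character-by-character with a flush buffer.
--     mots = []
--     separateurs = []
--     i = 0
--     n = len(phrase)
--     while i < n:
--         if phrase[i].isalnum() or phrase[i] == "'":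
--             j = i + 1
--             while j < n and (phrase[j].isalnum() or phrase[j] == "'"):
--                 j += 1
--             mots.append(phrase[i:j])
--             i = j
--         else:
--             separateurs.append(phrase[i])
--             i += 1
--     return [mots, separateurs]
-- ===== Notes on version B (the rewrite author's own statement) =====
-- stated objective: alternative
-- what changed: Replaces the per-character buffer/flush state machine with a run-based scan that consumes each maximal run of word characters in one inner jump and slices the word out directly.
import Mathlib
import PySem

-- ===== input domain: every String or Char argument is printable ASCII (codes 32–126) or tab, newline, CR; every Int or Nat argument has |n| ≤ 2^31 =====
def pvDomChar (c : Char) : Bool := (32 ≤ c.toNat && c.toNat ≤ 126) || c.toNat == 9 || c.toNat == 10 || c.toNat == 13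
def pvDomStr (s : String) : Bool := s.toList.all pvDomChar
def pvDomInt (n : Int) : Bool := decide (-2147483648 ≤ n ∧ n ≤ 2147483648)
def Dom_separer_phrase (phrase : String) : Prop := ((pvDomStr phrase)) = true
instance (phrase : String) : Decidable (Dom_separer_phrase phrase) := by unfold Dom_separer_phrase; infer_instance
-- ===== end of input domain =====

-- B is a run-based scan (consume maximal word-character runs at once) instead of A's
-- per-character buffer/flush state machine; return values proved equal on Dom.

-- word character: char.isalnum() or char == "'"
def pvWord (c : Char) : Bool := PySem.Chars.isalnum c || c == '\''

-- ===== PORT A =====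
-- A's fold state: (mots, separateurs, mot); 'mot' kept as List Char, turned into a
-- String exactly when A appends it.
def pvStepA (st : List String × List String × List Char) (c : Char) :
    List String × List String × List Char :=
  let (mots, seps, mot) := st
  if pvWord c then (mots, seps, mot ++ [c])
  else if mot ≠ [] then (mots ++ [String.ofList mot], seps ++ [String.ofList [c]], [])
  else (mots, seps ++ [String.ofList [c]], [])

def separer_phrase (phrase : String) : List (List String) :=
  let st := phrase.toList.foldl pvStepA ([], [], [])
  let mots := if st.2.2 ≠ [] then st.1 ++ [String.ofList st.2.2] else st.1
  [mots, st.2.1]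

-- ===== PORT B =====
-- run-based recursion: a word-char head takes the whole maximal run in one step
def pvRuns : List Char → List String × List String
  | [] => ([], [])
  | c :: rest =>
    if pvWord c then
      let run := rest.takeWhile pvWord
      let p := pvRuns (rest.dropWhile pvWord)
      (String.ofList (c :: run) :: p.1, p.2)
    else
      let p := pvRuns rest
      (p.1, String.ofList [c] :: p.2)
termination_by l => l.length
decreasing_by
  · simpa using Nat.lt_succ_of_le (List.length_dropWhile_le _ _)
  · simp

def separer_phrase_alt (phrase : String) : List (List String) :=
  let p := pvRuns phrase.toList
  [p.1, p.2]

-- ===== PRECONDITION & SPEC =====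
def Spec_separer_phrase (phrase : String) (out : List (List String)) : Prop := out = separer_phrase_alt phrase
instance (phrase : String) (out : List (List String)) : Decidable (Spec_separer_phrase phrase out) := by unfold Spec_separer_phrase; infer_instance

-- ===== CLAIM (what is proved, stated in full; the proofs are below) =====
def Claim_equal_separer_phrase : Prop := ∀ (phrase : String), Dom_separer_phrase phrase → Spec_separer_phrase phrase (separer_phrase phrase)

-- ===== LEMMAS AND PROOFS =====

theorem pvTake_append (m : List Char) (hm : ∀ x ∈ m, pvWord x = true)
    (c : Char) (hc : pvWord c = false) (l : List Char) :
    (m ++ c :: l).takeWhile pvWord = m := by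
  induction m with
  | nil => simp [hc]
  | cons b mb ih =>
    have hb : pvWord b = true := hm b (by simp)
    simp only [List.cons_append, List.takeWhile_cons, hb]
    simp [ih (fun x hx => hm x (by simp [hx]))]

theorem pvDrop_append (m : List Char) (hm : ∀ x ∈ m, pvWord x = true)
    (c : Char) (hc : pvWord c = false) (l : List Char) :
    (m ++ c :: l).dropWhile pvWord = c :: l := by
  induction m with
  | nil => simp [hc]
  | cons b mb ih =>
    have hb : pvWord b = true := hm b (by simp)
    simp only [List.cons_append, List.dropWhile_cons, hb]
    exact ih (fun x hx => hm x (by simp [hx]))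

theorem pvRuns_word_prefix (mot : List Char) (hall : ∀ c ∈ mot, pvWord c = true)
    (hne : mot ≠ []) (c : Char) (hc : pvWord c = false) (l : List Char) :
    pvRuns (mot ++ c :: l) =
      (String.ofList mot :: (pvRuns (c :: l)).1, (pvRuns (c :: l)).2) := by
  cases mot with
  | nil => exact absurd rfl hne
  | cons a m =>
    have ha : pvWord a = true := hall a (by simp)
    have hm : ∀ x ∈ m, pvWord x = true := fun x hx => hall x (by simp [hx])
    simp [pvRuns, ha, pvTake_append m hm c hc l, pvDrop_append m hm c hc l]

theorem pvRuns_all_word (mot : List Char) (hall : ∀ c ∈ mot, pvWord c = true)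
    (hne : mot ≠ []) : pvRuns mot = ([String.ofList mot], []) := by
  cases mot with
  | nil => exact absurd rfl hne
  | cons a m =>
    have ha : pvWord a = true := hall a (by simp)
    have hm : ∀ x ∈ m, pvWord x = true := fun x hx => hall x (by simp [hx])
    have htake : m.takeWhile pvWord = m := List.takeWhile_eq_self_iff.mpr hm
    have hdrop : m.dropWhile pvWord = [] := List.dropWhile_eq_nil_iff.mpr hm
    simp [pvRuns, ha, htake, hdrop]

-- main invariant: A's fold with pending word-buffer 'mot' equals B on mot ++ l
theorem pvInv (l : List Char) : ∀ (mots seps : List String) (mot : List Char),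
    (∀ c ∈ mot, pvWord c = true) →
    (let st := l.foldl pvStepA (mots, seps, mot)
     ((if st.2.2 ≠ [] then st.1 ++ [String.ofList st.2.2] else st.1), st.2.1))
    = (mots ++ (pvRuns (mot ++ l)).1, seps ++ (pvRuns (mot ++ l)).2) := by
  induction l with
  | nil =>
    intro mots seps mot hall
    cases mot with
    | nil => simp [pvRuns]
    | cons a m =>
      simp [pvRuns_all_word (a :: m) hall (by simp)]
  | cons c l ih =>
    intro mots seps mot hall
    by_cases hc : pvWord c = true
    · have : mot ++ c :: l = (mot ++ [c]) ++ l := by simp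
      rw [this]
      have := ih mots seps (mot ++ [c])
        (by intro x hx; rcases List.mem_append.mp hx with h | h
            · exact hall x h
            · simp at h; subst h; exact hc)
      simpa [pvStepA, hc] using this
    · have hc' : pvWord c = false := by simpa using hc
      cases mot with
      | nil =>
        have := ih mots (seps ++ [String.ofList [c]]) [] (by simp)
        simp only [List.foldl_cons, pvStepA, hc']
        rw [show ([] : List Char) ++ c :: l = c :: l by simp]
        simp only [pvRuns, hc']
        simpa using this
      | cons a m =>
        have hrw := pvRuns_word_prefix (a :: m) hall (by simp) c hc' l
        have := ih (mots ++ [String.ofList (a :: m)]) (seps ++ [String.ofList [c]]) [] (by simp)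
        simp only [List.foldl_cons, pvStepA, hc']
        simp only [hrw]
        simp only [pvRuns, hc']
        simpa using this

-- ===== VERDICT (by name: the statement is the Claim_ definition above) =====
theorem separer_phrase_spec : Claim_equal_separer_phrase := by
  intro phrase _
  unfold Spec_separer_phrase separer_phrase separer_phrase_alt
  have h := pvInv phrase.toList [] [] [] (by simp)
  simp only [List.nil_append] at h
  simp only []
  rw [show ∀ (a b : List String), [a, b] = [a, b] from fun _ _ => rfl]
  have := congrArg (fun p : List String × List String => [p.1, p.2]) h
  simpa using this
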